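-- pv_equiv track=rewrite | github.com/kimsuel/algorithm | 2021/naver_test.py | solution
-- ===== SOURCE A (Python) =====
-- def solution(id_list, k):
--     answer = 0
--     day_list = {}
--     count_list = {}
--     for idx, id in enumerate(id_list):
--         users = set(id.split(" "))
--         for i in users:
--             count_list[i] = count_list.get(i, 0) + 1
--             if (count_list.get(i) <= k):
--                 day_list.setdefault(idx, []).append(i)
--
--     answer = sum([len(day_list[x])
--                  for x in day_list if isinstance(day_list[x], list)])
--
--     return answer
-- ===== SOURCE B (Python) =====
-- def solution(id_list, k):
--     counts = {}
--     for day in id_list: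
--         for u in set(day.split(" ")):
--             counts[u] = counts.get(u, 0) + 1
--     return sum(max(0, min(c, k)) for c in counts.values())
-- ===== Notes on version B (the rewrite author's own statement) =====
-- stated objective: simpler
-- what changed: B drops A's day_list/idx bookkeeping and the per-event count<=k test: it only aggregates per-user distinct-day counts and returns the closed form sum of max(0, min(count, k)) over users.
import Mathlib
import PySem

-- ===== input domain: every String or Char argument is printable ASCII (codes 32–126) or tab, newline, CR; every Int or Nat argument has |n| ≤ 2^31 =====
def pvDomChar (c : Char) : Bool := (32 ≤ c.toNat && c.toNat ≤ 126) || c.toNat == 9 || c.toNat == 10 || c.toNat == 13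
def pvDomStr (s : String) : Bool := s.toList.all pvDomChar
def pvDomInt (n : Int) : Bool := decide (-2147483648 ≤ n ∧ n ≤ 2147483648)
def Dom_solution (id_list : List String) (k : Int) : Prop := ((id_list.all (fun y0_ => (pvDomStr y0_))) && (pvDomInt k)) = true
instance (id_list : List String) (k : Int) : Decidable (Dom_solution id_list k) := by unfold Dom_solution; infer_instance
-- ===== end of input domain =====

-- B replaces A's per-day day_list/idx bookkeeping and per-event count<=k test by a plain
-- per-user counter plus the closed form sum of max(0, min(count, k)); same return value.

-- ===== PORT A =====

-- set(id.split(" "))  (split with explicit separator " " never raises: the .getD [] branch is dead)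
def pvUsers (s : String) : PySem.Set String :=
  PySem.Set.ofList ((PySem.Str.split? s " ").getD [])

-- the body of A's inner loop: bump count_list[i], and when the new count is ≤ k append i to day_list[idx]
def pvStepA (k : Int) (st : PySem.Dict String Int × PySem.Dict Int (List String))
    (idx : Int) (i : String) : PySem.Dict String Int × PySem.Dict Int (List String) :=
  let cl := st.1.insert i (st.1.getD i 0 + 1)
  if cl.getD i 0 ≤ k then (cl, st.2.insert idx (st.2.getD idx [] ++ [i]))
  else (cl, st.2)

-- A; the final comprehension's isinstance(day_list[x], list) test is always true (every stored
-- value is a list), so it is ported as the plain sum of the lengths of day_list's values.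
def solution (id_list : List String) (k : Int) : Int :=
  let st := (PySem.List.enumerate id_list).foldl
    (fun st p => (pvUsers p.2).foldl (fun st2 i => pvStepA k st2 p.1 i) st)
    (PySem.Dict.empty, PySem.Dict.empty)
  (st.2.items.map (fun p => (p.2.length : Int))).sum

-- ===== PORT B =====
def solution_alt (id_list : List String) (k : Int) : Int :=
  let counts := id_list.foldl
    (fun d day => (pvUsers day).foldl (fun d u => d.insert u (d.getD u 0 + 1)) d)
    PySem.Dict.empty
  (counts.values.map (fun c => max 0 (min c k))).sum

-- ===== PRECONDITION & SPEC =====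
def Spec_solution (id_list : List String) (k : Int) (out : Int) : Prop := out = solution_alt id_list k
instance (id_list : List String) (k : Int) (out : Int) : Decidable (Spec_solution id_list k out) := by unfold Spec_solution; infer_instance

-- ===== CLAIM (what is proved, stated in full; the proofs are below) =====
def Claim_equal_solution : Prop := ∀ (id_list : List String) (k : Int), Dom_solution id_list k → Spec_solution id_list k (solution id_list k)

-- ===== LEMMAS AND PROOFS =====

-- sum of f over a dict's values
def pvSumF {κ ν : Type} (f : ν → Int) (d : PySem.Dict κ ν) : Int :=
  (d.items.map (fun p => f p.2)).sum

-- replacing the (unique, by nodup keys) entry with key x by (x, v) changes the sum by f v - f c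
theorem pv_replace_sum {κ ν : Type} [BEq κ] [LawfulBEq κ] (f : ν → Int) (x : κ) (v : ν) :
    ∀ (l : List (κ × ν)), (l.map Prod.fst).Nodup →
    ∀ c : ν, (l.find? (fun p => p.1 == x)).map Prod.snd = some c →
    ((l.map (fun p => if p.1 == x then (x, v) else p)).map (fun p => f p.2)).sum
      = (l.map (fun p => f p.2)).sum - f c + f v := by
  intro l
  induction l with
  | nil => intro _ c hc; simp at hc
  | cons a t ih =>
    intro hn c hc
    simp only [List.map_cons, List.nodup_cons, List.mem_map] at hn
    by_cases ha : (a.1 == x) = true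
    · have hax : a.1 = x := by exact beq_iff_eq.mp ha
      rw [List.find?_cons, ha] at hc
      simp only [Option.map_some] at hc
      have hcb : c = a.2 := by injection hc with h; exact h.symm
      have ht : t.map (fun p => if p.1 == x then (x, v) else p) = t := by
        conv_rhs => rw [← List.map_id t]
        apply List.map_congr_left
        intro p hp
        have hne : p.1 ≠ x := by
          intro hpx
          exact hn.1 ⟨p, hp, by rw [hpx, hax]⟩
        simp [hne]
      simp only [List.map_cons, if_pos ha, ht, List.sum_cons, hcb]
      ring
    · have ha' : (a.1 == x) = false := by simpa using ha
      rw [List.find?_cons, ha'] at hc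
      simp only [List.map_cons, if_neg ha, List.sum_cons,
        ih hn.2 c hc]
      ring

theorem pv_sumF_insert_some {κ ν : Type} [BEq κ] [LawfulBEq κ] (f : ν → Int)
    (d : PySem.Dict κ ν) (hn : d.keys.Nodup) (x : κ) (v : ν) (c : ν)
    (hc : d.get? x = some c) :
    pvSumF f (d.insert x v) = pvSumF f d + f v - f c := by
  have h : d.contains x = true := by
    rw [PySem.Dict.contains_eq_isSome_get?, hc]; rfl
  have hfind : (d.items.find? (fun p => p.1 == x)).map Prod.snd = some c := by
    simpa [PySem.Dict.get?] using hc
  have hkeys : (d.items.map Prod.fst).Nodup := by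
    simpa [PySem.Dict.keys] using hn
  unfold pvSumF
  rw [PySem.Dict.items_insert_of_contains d v h,
    pv_replace_sum f x v d.items hkeys c hfind]
  ring

theorem pv_sumF_insert_none {κ ν : Type} [BEq κ] [LawfulBEq κ] (f : ν → Int)
    (d : PySem.Dict κ ν) (x : κ) (v : ν) (hg : d.get? x = none) :
    pvSumF f (d.insert x v) = pvSumF f d + f v := by
  have h : d.contains x = false := by
    rw [PySem.Dict.contains_eq_isSome_get?, hg]; rfl
  unfold pvSumF
  rw [PySem.Dict.items_insert_of_not_contains d v h]
  simp

-- the invariant A's loop maintains: nodup keys in both dicts, count values ≥ 1,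
-- and the total length stored in day_list equals the clamped sum over count_list
def pvInv (k : Int) (st : PySem.Dict String Int × PySem.Dict Int (List String)) : Prop :=
  st.1.keys.Nodup ∧ st.2.keys.Nodup ∧
  (∀ (u : String) (c : Int), st.1.get? u = some c → 1 ≤ c) ∧
  pvSumF (fun p => (p.length : Int)) st.2 = pvSumF (fun c => max 0 (min c k)) st.1

theorem pv_stepA_inv (k : Int) (st : PySem.Dict String Int × PySem.Dict Int (List String))
    (idx : Int) (i : String) (h : pvInv k st) : pvInv k (pvStepA k st idx i) := by
  obtain ⟨hn1, hn2, hpos, hsum⟩ := h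
  -- the old count of user i, with 0 ≤ c0
  have hc0 : 0 ≤ st.1.getD i 0 := by
    rcases hg : st.1.get? i with _ | c
    · simp [PySem.Dict.getD, hg]
    · have := hpos i c hg; simp [PySem.Dict.getD, hg]; omega
  have hcl : pvSumF (fun c => max 0 (min c k)) (st.1.insert i (st.1.getD i 0 + 1))
      = pvSumF (fun c => max 0 (min c k)) st.1
        + (if st.1.getD i 0 + 1 ≤ k then 1 else 0) := by
    rcases hg : st.1.get? i with _ | c
    · rw [pv_sumF_insert_none _ _ _ _ hg]
      have h0 : st.1.getD i 0 = 0 := by simp [PySem.Dict.getD, hg]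
      rw [h0]
      split_ifs with hk <;> omega
    · rw [pv_sumF_insert_some _ _ hn1 _ _ _ hg]
      have hgd : st.1.getD i 0 = c := by simp [PySem.Dict.getD, hg]
      have hc : 1 ≤ c := hpos i c hg
      rw [hgd]
      split_ifs with hk <;> omega
  have hpos' : ∀ (u : String) (c : Int),
      (st.1.insert i (st.1.getD i 0 + 1)).get? u = some c → 1 ≤ c := by
    intro u c hg
    by_cases hui : u = i
    · rw [hui, PySem.Dict.get?_insert_self] at hg
      simp only [Option.some.injEq] at hg
      omega
    · rw [PySem.Dict.get?_insert_of_ne _ _ hui] at hg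
      exact hpos u c hg
  unfold pvStepA
  by_cases hk : (st.1.insert i (st.1.getD i 0 + 1)).getD i 0 ≤ k
  · have hki : st.1.getD i 0 + 1 ≤ k := by
      rw [PySem.Dict.getD_insert] at hk; simpa using hk
    rw [if_pos (by rw [PySem.Dict.getD_insert]; simpa using hki)]
    refine ⟨PySem.Dict.nodup_keys_insert _ _ _ hn1,
      PySem.Dict.nodup_keys_insert _ _ _ hn2, hpos', ?_⟩
    rw [hcl, if_pos hki]
    rcases hg : st.2.get? idx with _ | l
    · rw [pv_sumF_insert_none _ _ _ _ hg, hsum]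
      simp [PySem.Dict.getD, hg]
    · rw [pv_sumF_insert_some _ _ hn2 _ _ _ hg, hsum]
      simp [PySem.Dict.getD, hg]
      ring
  · have hki : ¬ (st.1.getD i 0 + 1 ≤ k) := by
      rw [PySem.Dict.getD_insert] at hk; simpa using hk
    rw [if_neg (by rw [PySem.Dict.getD_insert]; simpa using hki)]
    refine ⟨PySem.Dict.nodup_keys_insert _ _ _ hn1, hn2, hpos', ?_⟩
    rw [hcl, if_neg hki, hsum]; ring

theorem pv_foldUsers_inv (k idx : Int) :
    ∀ (users : List String) (st), pvInv k st →
      pvInv k (users.foldl (fun st2 i => pvStepA k st2 idx i) st) := by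
  intro users
  induction users with
  | nil => intro st h; exact h
  | cons u t ih => intro st h; exact ih _ (pv_stepA_inv k st idx u h)

theorem pv_foldA_inv (k : Int) :
    ∀ (l : List (Int × String)) (st), pvInv k st →
      pvInv k (l.foldl (fun st p => (pvUsers p.2).foldl (fun st2 i => pvStepA k st2 p.1 i) st) st) := by
  intro l
  induction l with
  | nil => intro st h; exact h
  | cons p t ih => intro st h; exact ih _ (pv_foldUsers_inv k p.1 (pvUsers p.2) st h)

-- the count_list component of A's fold is exactly B's counter fold
theorem pv_fst_step (k : Int) (st) (idx : Int) (i : String) :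
    (pvStepA k st idx i).1 = st.1.insert i (st.1.getD i 0 + 1) := by
  dsimp only [pvStepA]
  split <;> rfl

theorem pv_fst_foldUsers (k idx : Int) :
    ∀ (users : List String) (st),
      (users.foldl (fun st2 i => pvStepA k st2 idx i) st).1
        = users.foldl (fun d u => d.insert u (d.getD u 0 + 1)) st.1 := by
  intro users
  induction users with
  | nil => intro st; rfl
  | cons u t ih =>
    intro st
    simp only [List.foldl_cons, ih, pv_fst_step]

theorem pv_fst_foldA (k : Int) :
    ∀ (l : List (Int × String)) (st),
      (l.foldl (fun st p => (pvUsers p.2).foldl (fun st2 i => pvStepA k st2 p.1 i) st) st).1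
        = (l.map (fun x => x.2)).foldl
            (fun d day => (pvUsers day).foldl (fun d u => d.insert u (d.getD u 0 + 1)) d) st.1 := by
  intro l
  induction l with
  | nil => intro st; rfl
  | cons p t ih =>
    intro st
    simp only [List.foldl_cons, List.map_cons, ih, pv_fst_foldUsers]

theorem pv_main (id_list : List String) (k : Int) :
    ((((PySem.List.enumerate id_list).foldl
        (fun st p => (pvUsers p.2).foldl (fun st2 i => pvStepA k st2 p.1 i) st)
        (PySem.Dict.empty, PySem.Dict.empty)).2.items.map (fun p => (p.2.length : Int))).sum)
    = (((id_list.foldl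
        (fun d day => (pvUsers day).foldl (fun d u => d.insert u (d.getD u 0 + 1)) d)
        PySem.Dict.empty).values.map (fun c => max 0 (min c k))).sum) := by
  have hinit : pvInv k ((PySem.Dict.empty : PySem.Dict String Int),
      (PySem.Dict.empty : PySem.Dict Int (List String))) := by
    refine ⟨PySem.Dict.nodup_keys_empty, PySem.Dict.nodup_keys_empty, ?_, rfl⟩
    intro u c hg
    rw [PySem.Dict.get?_empty] at hg
    exact absurd hg (by simp)
  obtain ⟨-, -, -, hsum⟩ :=
    pv_foldA_inv k (PySem.List.enumerate id_list) (PySem.Dict.empty, PySem.Dict.empty) hinit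
  have hfst := pv_fst_foldA k (PySem.List.enumerate id_list)
    (PySem.Dict.empty, PySem.Dict.empty)
  rw [PySem.List.map_snd_enumerate] at hfst
  unfold pvSumF at hsum
  rw [hfst] at hsum
  simp only [PySem.Dict.values, List.map_map]
  simpa [Function.comp] using hsum

-- ===== VERDICT (by name: the statement is the Claim_ definition above) =====
theorem solution_spec : Claim_equal_solution := by
  intro id_list k _
  show solution id_list k = solution_alt id_list k
  exact pv_main id_list k
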